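-- pv_equiv track=rewrite | github.com/pranavik24/CodeSwitch | src/codeswitch_pipeline/generation.py | _sentence_candidate_groups
-- ===== SOURCE A (Python) =====
-- def _sentence_candidate_groups(tokens: list[str], candidate_indices: list[int]) -> list[list[int]]:
--     groups: list[list[int]] = []
--     current: list[int] = []
--     candidate_set = set(candidate_indices)
--     for index, token in enumerate(tokens):
--         if index in candidate_set:
--             current.append(index)
--         if token in {".", "!", "?"}:
--             if current:
--                 groups.append(current)
--                 current = []
--     if current:
--         groups.append(current)
--     return groups
-- ===== SOURCE B (Python) =====
-- def _sentence_candidate_groups(tokens: list[str], candidate_indices: list[int]) -> list[list[int]]: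
--     punct = {".", "!", "?"}
--     n = len(tokens)
--     # prefix[i] = number of sentence-ending tokens strictly before position i
--     prefix = []
--     run = 0
--     for t in tokens:
--         prefix.append(run)
--         if t in punct:
--             run += 1
--     groups: list[list[int]] = []
--     last_key = -1
--     for i in sorted({c for c in candidate_indices if 0 <= c < n}):
--         k = prefix[i]
--         if groups and k == last_key:
--             groups[-1].append(i)
--         else:
--             groups.append([i])
--         last_key = k
--     return groups
-- ===== Notes on version B (the rewrite author's own statement) =====
-- stated objective: alternative
-- what changed: Replaces the interleaved scan that flushes the current group at each sentence-ending token with a boundary-count decomposition: a prefix count of punctuation tokens is precomputed, the candidate indices are deduplicated, range-filtered and sorted, and consecutive candidates sharing the same prefix-count key are grouped.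
import Mathlib
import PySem

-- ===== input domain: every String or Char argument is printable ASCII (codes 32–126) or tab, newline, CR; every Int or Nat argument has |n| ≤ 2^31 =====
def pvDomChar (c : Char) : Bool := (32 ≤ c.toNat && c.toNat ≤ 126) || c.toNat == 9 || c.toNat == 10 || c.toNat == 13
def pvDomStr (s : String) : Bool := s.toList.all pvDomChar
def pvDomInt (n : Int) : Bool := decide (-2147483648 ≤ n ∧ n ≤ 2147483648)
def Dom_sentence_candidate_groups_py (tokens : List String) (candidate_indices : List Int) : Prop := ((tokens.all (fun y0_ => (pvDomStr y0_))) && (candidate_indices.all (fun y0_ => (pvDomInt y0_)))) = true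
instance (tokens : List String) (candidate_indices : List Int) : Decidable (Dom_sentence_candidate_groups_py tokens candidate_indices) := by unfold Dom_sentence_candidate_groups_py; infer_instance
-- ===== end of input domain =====

-- B groups the deduplicated, range-filtered, sorted candidate indices by a precomputed
-- punctuation-prefix-count key instead of A's interleaved flush-on-punctuation scan (alternative decomposition).


-- ===== PORT A =====
-- one step of A's `for index, token in enumerate(tokens)` loop
def pvAStep (candidate_set : PySem.Set Int) (st : List (List Int) × List Int) (p : Int × String) :
    List (List Int) × List Int :=
  let current := if PySem.Set.contains candidate_set p.1 then st.2 ++ [p.1] else st.2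
  if p.2 == "." || p.2 == "!" || p.2 == "?" then
    if current = [] then (st.1, current) else (st.1 ++ [current], [])
  else (st.1, current)

def sentence_candidate_groups_py (tokens : List String) (candidate_indices : List Int) : List (List Int) :=
  let candidate_set : PySem.Set Int := PySem.Set.ofList candidate_indices
  let st := (PySem.List.enumerate tokens).foldl (pvAStep candidate_set) ([], [])
  if st.2 = [] then st.1 else st.1 ++ [st.2]

-- ===== PORT B =====
-- one step of B's `for t in tokens` prefix-building loop (state = (prefix, run))
def pvBPrefStep (st : List Int × Int) (t : String) : List Int × Int :=
  (st.1 ++ [st.2], if t == "." || t == "!" || t == "?" then st.2 + 1 else st.2)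

-- one step of B's grouping loop over the sorted candidates (state = (groups, last_key))
def pvBGroupStep (pr : List Int) (st : List (List Int) × Int) (i : Int) : List (List Int) × Int :=
  let k := (PySem.List.pyGet? pr i).getD 0  -- `prefix[i]`: i is provably in range here, Python never raises
  (if st.1 ≠ [] ∧ k = st.2 then st.1.dropLast ++ [st.1.getLastD [] ++ [i]] else st.1 ++ [[i]], k)

def sentence_candidate_groups_py_alt (tokens : List String) (candidate_indices : List Int) : List (List Int) :=
  let n : Int := (tokens.length : Int)
  let pr := tokens.foldl pvBPrefStep ([], 0)
  let cands := PySem.List.sorted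
    (PySem.Set.ofList (candidate_indices.filter (fun c => decide (0 ≤ c) && decide (c < n))))
    (fun x => x) false
  (cands.foldl (pvBGroupStep pr.1) ([], -1)).1

-- ===== PRECONDITION & SPEC =====
def Spec_sentence_candidate_groups_py (tokens : List String) (candidate_indices : List Int) (out : List (List Int)) : Prop := out = sentence_candidate_groups_py_alt tokens candidate_indices
instance (tokens : List String) (candidate_indices : List Int) (out : List (List Int)) : Decidable (Spec_sentence_candidate_groups_py tokens candidate_indices out) := by unfold Spec_sentence_candidate_groups_py; infer_instance

-- ===== CLAIM (what is proved, stated in full; the proofs are below) =====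
def Claim_equal_sentence_candidate_groups_py : Prop := ∀ (tokens : List String) (candidate_indices : List Int), Dom_sentence_candidate_groups_py tokens candidate_indices → Spec_sentence_candidate_groups_py tokens candidate_indices (sentence_candidate_groups_py tokens candidate_indices)

-- ===== LEMMAS AND PROOFS =====

def pvPC (ts : List String) : Int :=
  (ts.countP (fun t => t == "." || t == "!" || t == "?") : Int)
lemma pvPC_append_singleton (ts : List String) (t : String) :
    pvPC (ts ++ [t]) = pvPC ts + (if t == "." || t == "!" || t == "?" then 1 else 0) := by
  simp [pvPC, List.countP_append, List.countP_cons]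
lemma pvBPref_spec (ts : List String) :
    ts.foldl pvBPrefStep ([], 0) =
      ((List.range ts.length).map (fun j => pvPC (ts.take j)), pvPC ts) := by
  induction ts using List.reverseRecOn with
  | nil => simp [pvPC]
  | append_singleton ts t ih =>
      rw [List.foldl_append, ih]
      simp only [List.foldl_cons, List.foldl_nil, pvBPrefStep]
      refine Prod.ext ?_ ?_
      · simp only [List.length_append, List.length_singleton, List.range_succ, List.map_append,
          List.map_cons, List.map_nil]
        congr 1
        · apply List.map_congr_left
          intro j hj
          rw [List.take_append_of_le_length (by simp at hj; omega)]
        · simp [List.take_append_of_le_length (le_refl ts.length), List.take_length]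
      · simp [pvPC_append_singleton]
        split_ifs <;> simp
lemma pvKey_spec (ts : List String) (i : Int) (h0 : 0 ≤ i) (h1 : i < (ts.length : Int)) :
    ((PySem.List.pyGet? (ts.foldl pvBPrefStep ([], 0)).1 i).getD 0) = pvPC (ts.take i.toNat) := by
  rw [pvBPref_spec]
  dsimp only
  have hi : i = ((i.toNat : Nat) : Int) := by omega
  rw [hi, PySem.List.pyGet?_natCast]
  have hlt : i.toNat < ts.length := by omega
  simp [hlt]
  congr 2
  omega
def pvCand (cs : List Int) (n : Nat) : List Int :=
  PySem.List.sorted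
    (PySem.Set.ofList (cs.filter (fun c => decide (0 ≤ c) && decide (c < (n : Int)))))
    (fun x => x) false
lemma pvCand_mem {cs : List Int} {n : Nat} {x : Int} (h : x ∈ pvCand cs n) :
    x ∈ cs ∧ 0 ≤ x ∧ x < (n : Int) := by
  rw [pvCand, PySem.List.mem_sorted, PySem.Set.mem_ofList, List.mem_filter] at h
  simpa using h
lemma pvCand_nodup (cs : List Int) (n : Nat) : (pvCand cs n).Nodup := by
  have := PySem.List.sorted_ofList_pairwise_lt (xs := cs.filter (fun c => decide (0 ≤ c) && decide (c < (n : Int))))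
  exact this.imp (fun h => ne_of_lt h)
lemma pvCand_succ (cs : List Int) (n : Nat) :
    pvCand cs (n + 1) = pvCand cs n ++ (if (n : Int) ∈ cs then [(n : Int)] else []) := by
  apply PySem.List.sorted_eq_of_perm_of_pairwise_lt
  · rw [List.perm_ext_iff_of_nodup ?_ (PySem.Set.nodup_ofList _)]
    · intro a
      simp only [List.mem_append, PySem.Set.mem_ofList, List.mem_filter]
      constructor
      · rintro (h | h)
        · obtain ⟨h1, h2, h3⟩ := pvCand_mem h
          refine ⟨h1, by simp; omega⟩
        · split at h <;> simp_all
      · rintro ⟨hcs, hb⟩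
        simp only [Bool.and_eq_true, decide_eq_true_eq] at hb
        by_cases ha : a < (n : Int)
        · left
          rw [pvCand, PySem.List.mem_sorted, PySem.Set.mem_ofList, List.mem_filter]
          simp [hcs, hb.1, ha]
        · right
          have : a = (n : Int) := by omega
          subst this
          simp [hcs]
    · apply List.Nodup.append (pvCand_nodup cs n)
      · split <;> simp
      · intro a ha hb
        have := (pvCand_mem ha).2.2
        split at hb <;> simp_all
  · rw [List.pairwise_append]
    refine ⟨PySem.List.sorted_ofList_pairwise_lt _, by split <;> simp, ?_⟩
    intro a ha b hb
    have := (pvCand_mem ha).2.2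
    split at hb <;> simp_all
lemma pvInv (cs : List Int) (ts : List String) :
    ((pvCand cs ts.length).foldl (pvBGroupStep (ts.foldl pvBPrefStep ([], 0)).1) ([], -1)).1 =
      (((PySem.List.enumerate ts).foldl (pvAStep (PySem.Set.ofList cs)) ([], [])).1 ++
        (if ((PySem.List.enumerate ts).foldl (pvAStep (PySem.Set.ofList cs)) ([], [])).2 = [] then []
         else [((PySem.List.enumerate ts).foldl (pvAStep (PySem.Set.ofList cs)) ([], [])).2])) ∧
    (if ((PySem.List.enumerate ts).foldl (pvAStep (PySem.Set.ofList cs)) ([], [])).2 = [] then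
        ((pvCand cs ts.length).foldl (pvBGroupStep (ts.foldl pvBPrefStep ([], 0)).1) ([], -1)).2 < pvPC ts
     else
        ((pvCand cs ts.length).foldl (pvBGroupStep (ts.foldl pvBPrefStep ([], 0)).1) ([], -1)).2 = pvPC ts) := by
  induction ts using List.reverseRecOn with
  | nil =>
      have hc : pvCand cs 0 = [] := by
        rw [pvCand, PySem.List.sorted_eq_nil_iff, List.eq_nil_iff_forall_not_mem]
        intro x hx
        rw [PySem.Set.mem_ofList, List.mem_filter] at hx
        simp at hx
        omega
      simp [hc, PySem.List.enumerate, pvPC]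
  | append_singleton ts t ih =>
      obtain ⟨ih1, ih2⟩ := ih
      have hlen : (ts ++ [t]).length = ts.length + 1 := by simp
      rw [hlen, pvCand_succ]
      -- the old candidates see the same keys in the extended prefix list
      have hpr : ∀ st : List (List Int) × Int,
          (pvCand cs ts.length).foldl (pvBGroupStep ((ts ++ [t]).foldl pvBPrefStep ([], 0)).1) st =
          (pvCand cs ts.length).foldl (pvBGroupStep (ts.foldl pvBPrefStep ([], 0)).1) st := by
        intro st
        apply PySem.List.foldl_congr_mem
        intro acc i hi
        obtain ⟨-, h0, h1⟩ := pvCand_mem hi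
        have hk : ((PySem.List.pyGet? ((ts ++ [t]).foldl pvBPrefStep ([], 0)).1 i).getD 0) =
            ((PySem.List.pyGet? (ts.foldl pvBPrefStep ([], 0)).1 i).getD 0) := by
          rw [pvKey_spec ts i h0 h1, pvKey_spec (ts ++ [t]) i h0 (by simp; omega),
            List.take_append_of_le_length (by omega)]
        simp only [pvBGroupStep, hk]
      -- the key of the possibly-new candidate ts.length
      have hkn : ((PySem.List.pyGet? ((ts ++ [t]).foldl pvBPrefStep ([], 0)).1 (ts.length : Int)).getD 0) = pvPC ts := by
        rw [pvKey_spec (ts ++ [t]) (ts.length : Int) (by omega) (by simp)]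
        simp
      simp only [List.foldl_append, List.foldl_cons, List.foldl_nil,
        PySem.List.pyGet?_natCast] at hkn hpr
      rw [PySem.List.enumerate_append]
      simp only [PySem.List.enumerate_cons, PySem.List.enumerate_nil, List.foldl_append,
        List.foldl_cons, List.foldl_nil, zero_add]
      rw [hpr]
      set a := (PySem.List.enumerate ts).foldl (pvAStep (PySem.Set.ofList cs)) ([], []) with ha
      set b := (pvCand cs ts.length).foldl (pvBGroupStep (ts.foldl pvBPrefStep ([], 0)).1) ([], -1) with hb
      rw [pvPC_append_singleton]
      by_cases hn : ((ts.length : Int) ∈ cs) <;>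
        by_cases hcur : a.2 = [] <;>
        by_cases hp : (t == "." || t == "!" || t == "?") = true
      · -- new candidate, empty current, punctuation
        have hb2 : b.2 < pvPC ts := by simpa [hcur] using ih2
        have hb1 : b.1 = a.1 := by simpa [hcur] using ih1
        have hne : pvPC ts ≠ b.2 := by omega
        refine ⟨by simp [pvAStep, pvBGroupStep, hn, hcur, hp, hkn, hb1, hne], ?_⟩
        simp [pvAStep, pvBGroupStep, hn, hcur, hp, hkn, hne]
      · -- new candidate, empty current, no punctuation
        have hb2 : b.2 < pvPC ts := by simpa [hcur] using ih2
        have hb1 : b.1 = a.1 := by simpa [hcur] using ih1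
        have hne : pvPC ts ≠ b.2 := by omega
        refine ⟨by simp [pvAStep, pvBGroupStep, hn, hcur, hp, hkn, hb1, hne], ?_⟩
        simp [pvAStep, pvBGroupStep, hn, hcur, hp, hkn, hne]
      · -- new candidate, nonempty current, punctuation
        have hb2 : b.2 = pvPC ts := by simpa [hcur] using ih2
        have hb1 : b.1 = a.1 ++ [a.2] := by simpa [hcur] using ih1
        refine ⟨?_, ?_⟩
        · simp [pvAStep, pvBGroupStep, hn, hcur, hp, hkn, hb1, hb2]
        · simp [pvAStep, pvBGroupStep, hn, hcur, hp, hkn, hb1, hb2]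
      · -- new candidate, nonempty current, no punctuation
        have hb2 : b.2 = pvPC ts := by simpa [hcur] using ih2
        have hb1 : b.1 = a.1 ++ [a.2] := by simpa [hcur] using ih1
        refine ⟨?_, ?_⟩
        · simp [pvAStep, pvBGroupStep, hn, hcur, hp, hkn, hb1, hb2]
        · simp [pvAStep, pvBGroupStep, hn, hcur, hp, hkn, hb1, hb2]
      · -- no new candidate, empty current, punctuation
        have hb2 : b.2 < pvPC ts := by simpa [hcur] using ih2
        have hb1 : b.1 = a.1 := by simpa [hcur] using ih1
        refine ⟨by simp [pvAStep, hn, hcur, hp, hb1], ?_⟩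
        simp [pvAStep, hn, hcur, hp]
        omega
      · -- no new candidate, empty current, no punctuation
        have hb1 : b.1 = a.1 := by simpa [hcur] using ih1
        refine ⟨by simp [pvAStep, hn, hcur, hp, hb1], ?_⟩
        have hb2 : b.2 < pvPC ts := by simpa [hcur] using ih2
        simp [pvAStep, hn, hcur, hp]
        omega
      · -- no new candidate, nonempty current, punctuation
        have hb2 : b.2 = pvPC ts := by simpa [hcur] using ih2
        have hb1 : b.1 = a.1 ++ [a.2] := by simpa [hcur] using ih1
        refine ⟨by simp [pvAStep, hn, hcur, hp, hb1], ?_⟩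
        simp [pvAStep, hn, hcur, hp]
        omega
      · -- no new candidate, nonempty current, no punctuation
        have hb2 : b.2 = pvPC ts := by simpa [hcur] using ih2
        have hb1 : b.1 = a.1 ++ [a.2] := by simpa [hcur] using ih1
        refine ⟨by simp [pvAStep, hn, hcur, hp, hb1], ?_⟩
        simp [pvAStep, hn, hcur, hp, hb2]

-- ===== VERDICT (by name: the statement is the Claim_ definition above) =====
theorem sentence_candidate_groups_py_spec : Claim_equal_sentence_candidate_groups_py := by
  intro tokens cs _
  show sentence_candidate_groups_py tokens cs = sentence_candidate_groups_py_alt tokens cs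
  have h1 := (pvInv cs tokens).1
  have halt : sentence_candidate_groups_py_alt tokens cs =
      ((pvCand cs tokens.length).foldl (pvBGroupStep ((tokens.foldl pvBPrefStep ([], 0)).1)) ([], -1)).1 := rfl
  rw [halt, h1]
  show (if ((PySem.List.enumerate tokens).foldl (pvAStep (PySem.Set.ofList cs)) ([], [])).2 = []
        then ((PySem.List.enumerate tokens).foldl (pvAStep (PySem.Set.ofList cs)) ([], [])).1
        else ((PySem.List.enumerate tokens).foldl (pvAStep (PySem.Set.ofList cs)) ([], [])).1 ++
          [((PySem.List.enumerate tokens).foldl (pvAStep (PySem.Set.ofList cs)) ([], [])).2]) = _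
  by_cases h : ((PySem.List.enumerate tokens).foldl (pvAStep (PySem.Set.ofList cs)) ([], [])).2 = [] <;>
    simp [h]
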